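-- pv_equiv track=rewrite | github.com/Welonbai/SR-GNN-robustness | attack/pipeline/runs/run_target_aware_coverage_local_position.py | _position_distribution
-- ===== SOURCE A (Python) =====
-- from typing import Any, Sequence
--
-- def _position_distribution(positions: Sequence[int]) -> dict[str, int]:
--     buckets = {
--         "pos1": 0,
--         "pos2": 0,
--         "pos3": 0,
--         "pos4_5": 0,
--         "pos6_plus": 0,
--     }
--     for position in positions:
--         pos = int(position)
--         if pos <= 1:
--             buckets["pos1"] += 1
--         elif pos == 2:
--             buckets["pos2"] += 1
--         elif pos == 3:
--             buckets["pos3"] += 1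
--         elif pos in (4, 5):
--             buckets["pos4_5"] += 1
--         else:
--             buckets["pos6_plus"] += 1
--     return buckets
-- ===== SOURCE B (Python) =====
-- from typing import Any, Sequence
--
-- def _position_distribution(positions: Sequence[int]) -> dict[str, int]:
--     ps = [int(p) for p in positions]
--     return {
--         "pos1": sum(1 for p in ps if p <= 1),
--         "pos2": ps.count(2),
--         "pos3": ps.count(3),
--         "pos4_5": sum(1 for p in ps if p == 4 or p == 5),
--         "pos6_plus": sum(1 for p in ps if p >= 6),
--     }
-- ===== Notes on version B (the rewrite author's own statement) =====
-- stated objective: alternative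
-- what changed: Replaces A's single loop that mutates a five-key bucket dict with a per-bucket counting formulation: B normalizes the positions once and builds the dict literal directly from five independent counts (sum-of-generator / list.count) over the list, with no mutable accumulator.
import Mathlib
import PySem

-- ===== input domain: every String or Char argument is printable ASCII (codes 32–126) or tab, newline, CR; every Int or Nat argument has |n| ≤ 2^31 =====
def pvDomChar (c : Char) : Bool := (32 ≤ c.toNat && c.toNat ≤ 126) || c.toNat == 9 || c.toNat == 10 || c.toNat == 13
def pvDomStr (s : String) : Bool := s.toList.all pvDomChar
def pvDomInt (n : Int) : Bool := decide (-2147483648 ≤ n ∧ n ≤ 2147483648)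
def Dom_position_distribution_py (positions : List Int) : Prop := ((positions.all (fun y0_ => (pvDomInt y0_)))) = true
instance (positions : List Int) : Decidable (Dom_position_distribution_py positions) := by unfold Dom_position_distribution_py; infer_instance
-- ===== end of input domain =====

-- B replaces A's single mutating loop over a five-key bucket dict with five independent counts; same O(n) cost, alternative decomposition.

-- ===== PORT A =====
def position_distribution_py (positions : List Int) : List (String × Int) :=
  let buckets : PySem.Dict String Int :=
    (((((PySem.Dict.empty).insert "pos1" 0).insert "pos2" 0).insert "pos3" 0).insert "pos4_5" 0).insert "pos6_plus" 0
  let buckets := positions.foldl (fun b position =>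
    let pos := position  -- int(position) on an int is the identity
    if pos ≤ 1 then b.modify "pos1" 0 (· + 1)
    else if pos = 2 then b.modify "pos2" 0 (· + 1)
    else if pos = 3 then b.modify "pos3" 0 (· + 1)
    else if pos = 4 ∨ pos = 5 then b.modify "pos4_5" 0 (· + 1)
    else b.modify "pos6_plus" 0 (· + 1)) buckets
  buckets.items

-- ===== PORT B =====
def position_distribution_py_alt (positions : List Int) : List (String × Int) :=
  let ps := positions.map (fun p => p)  -- [int(p) for p in positions]
  [("pos1", (ps.countP (fun p => decide (p ≤ 1)) : Int)),
   ("pos2", (ps.count 2 : Int)),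
   ("pos3", (ps.count 3 : Int)),
   ("pos4_5", (ps.countP (fun p => decide (p = 4 ∨ p = 5)) : Int)),
   ("pos6_plus", (ps.countP (fun p => decide (6 ≤ p)) : Int))]

-- ===== PRECONDITION & SPEC =====
def Spec_position_distribution_py (positions : List Int) (out : List (String × Int)) : Prop := out = position_distribution_py_alt positions
instance (positions : List Int) (out : List (String × Int)) : Decidable (Spec_position_distribution_py positions out) := by unfold Spec_position_distribution_py; infer_instance

-- ===== CLAIM (what is proved, stated in full; the proofs are below) =====
def Claim_equal_position_distribution_py : Prop := ∀ (positions : List Int), Dom_position_distribution_py positions → Spec_position_distribution_py positions (position_distribution_py positions)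

-- ===== LEMMAS AND PROOFS =====

-- the five-bucket dict with symbolic values, as the fold's state
def pvBuckets (a b c d e : Int) : PySem.Dict String Int :=
  PySem.Dict.mk [("pos1", a), ("pos2", b), ("pos3", c), ("pos4_5", d), ("pos6_plus", e)]

lemma pvBump1 (a b c d e : Int) :
    (pvBuckets a b c d e).modify "pos1" 0 (· + 1) = pvBuckets (a + 1) b c d e := by
  apply PySem.Dict.ext
  simp [pvBuckets, PySem.Dict.modify, PySem.Dict.insert, PySem.Dict.getD, PySem.Dict.get?,
    PySem.Dict.contains]

lemma pvBump2 (a b c d e : Int) :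
    (pvBuckets a b c d e).modify "pos2" 0 (· + 1) = pvBuckets a (b + 1) c d e := by
  apply PySem.Dict.ext
  simp [pvBuckets, PySem.Dict.modify, PySem.Dict.insert, PySem.Dict.getD, PySem.Dict.get?,
    PySem.Dict.contains]

lemma pvBump3 (a b c d e : Int) :
    (pvBuckets a b c d e).modify "pos3" 0 (· + 1) = pvBuckets a b (c + 1) d e := by
  apply PySem.Dict.ext
  simp [pvBuckets, PySem.Dict.modify, PySem.Dict.insert, PySem.Dict.getD, PySem.Dict.get?,
    PySem.Dict.contains]

lemma pvBump4 (a b c d e : Int) :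
    (pvBuckets a b c d e).modify "pos4_5" 0 (· + 1) = pvBuckets a b c (d + 1) e := by
  apply PySem.Dict.ext
  simp [pvBuckets, PySem.Dict.modify, PySem.Dict.insert, PySem.Dict.getD, PySem.Dict.get?,
    PySem.Dict.contains]

lemma pvBump5 (a b c d e : Int) :
    (pvBuckets a b c d e).modify "pos6_plus" 0 (· + 1) = pvBuckets a b c d (e + 1) := by
  apply PySem.Dict.ext
  simp [pvBuckets, PySem.Dict.modify, PySem.Dict.insert, PySem.Dict.getD, PySem.Dict.get?,
    PySem.Dict.contains]

lemma pvBuckets_congr {a b c d e a' b' c' d' e' : Int}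
    (h1 : a = a') (h2 : b = b') (h3 : c = c') (h4 : d = d') (h5 : e = e') :
    pvBuckets a b c d e = pvBuckets a' b' c' d' e' := by
  subst h1 h2 h3 h4 h5; rfl

lemma pvFold_eq (ps : List Int) (a b c d e : Int) :
    ps.foldl (fun b position =>
      if position ≤ 1 then b.modify "pos1" 0 (· + 1)
      else if position = 2 then b.modify "pos2" 0 (· + 1)
      else if position = 3 then b.modify "pos3" 0 (· + 1)
      else if position = 4 ∨ position = 5 then b.modify "pos4_5" 0 (· + 1)
      else b.modify "pos6_plus" 0 (· + 1)) (pvBuckets a b c d e) =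
    pvBuckets (a + ps.countP (fun p => decide (p ≤ 1)))
              (b + ps.count 2) (c + ps.count 3)
              (d + ps.countP (fun p => decide (p = 4) || decide (p = 5)))
              (e + ps.countP (fun p => decide (6 ≤ p))) := by
  induction ps generalizing a b c d e with
  | nil => simp [pvBuckets]
  | cons x t ih =>
    rw [List.foldl_cons]
    by_cases h1 : x ≤ 1
    · rw [if_pos h1, pvBump1, ih]
      exact pvBuckets_congr (by simp [h1]; omega)
        (by simp [List.count_cons]; omega) (by simp [List.count_cons]; omega)
        (by simp [List.countP_cons]; omega) (by simp [List.countP_cons]; omega)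
    · rw [if_neg h1]
      by_cases h2 : x = 2
      · subst h2
        rw [if_pos rfl, pvBump2, ih]
        exact pvBuckets_congr (by simp )
          (by simp ; omega) (by simp )
          (by simp ) (by simp )
      · rw [if_neg h2]
        by_cases h3 : x = 3
        · subst h3
          rw [if_pos rfl, pvBump3, ih]
          exact pvBuckets_congr (by simp )
            (by simp ) (by simp ; omega)
            (by simp ) (by simp )
        · rw [if_neg h3]
          by_cases h45 : x = 4 ∨ x = 5
          · rw [if_pos h45, pvBump4, ih]
            exact pvBuckets_congr (by simp [List.countP_cons]; omega)
              (by simp [h2]) (by simp [h3])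
              (by simp [h45]; omega)
              (by simp [List.countP_cons]; omega)
          · rw [if_neg h45, pvBump5, ih]
            have h6 : 6 ≤ x := by omega
            exact pvBuckets_congr (by simp [List.countP_cons]; omega)
              (by simp [h2]) (by simp [h3])
              (by simp [h45]) (by simp [h6]; omega)

-- ===== VERDICT (by name: the statement is the Claim_ definition above) =====
theorem position_distribution_py_spec : Claim_equal_position_distribution_py := by
  intro positions _
  show position_distribution_py positions = position_distribution_py_alt positions
  show (positions.foldl (fun b position =>
      if position ≤ 1 then b.modify "pos1" 0 (· + 1)
      else if position = 2 then b.modify "pos2" 0 (· + 1)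
      else if position = 3 then b.modify "pos3" 0 (· + 1)
      else if position = 4 ∨ position = 5 then b.modify "pos4_5" 0 (· + 1)
      else b.modify "pos6_plus" 0 (· + 1)) (pvBuckets 0 0 0 0 0)).items =
    [("pos1", ((positions.map (fun p => p)).countP (fun p => decide (p ≤ 1)) : Int)),
     ("pos2", ((positions.map (fun p => p)).count 2 : Int)),
     ("pos3", ((positions.map (fun p => p)).count 3 : Int)),
     ("pos4_5", ((positions.map (fun p => p)).countP (fun p => decide (p = 4 ∨ p = 5)) : Int)),
     ("pos6_plus", ((positions.map (fun p => p)).countP (fun p => decide (6 ≤ p)) : Int))]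
  rw [pvFold_eq]
  simp [pvBuckets]
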